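-- pv_equiv track=rewrite | github.com/dylanbrodiefafard/ProjectEuler | PythonProject/solutions/Solution91.py | get_num_right_angle_triangles
-- ===== SOURCE A (Python) =====
-- from math import isclose, ceil, gcd
--
-- def get_num_right_angle_triangles(n):
--     num_triangles = 0
--     if n <= 0:
--         return num_triangles
--
--     # Count how many triangles with right-angles touching the boundary lines.
--     # Every point along the y-axis (0, 1...n), x-axis (1...n, 0), and right-edge (n, 1...n) makes a right-angled
--     # triangle with every other point like this.
--     # There are 3 of these lines *
--     # (the number of points along these lines * the number of points along the perpendicular line)
--     num_triangles += 3 * (n ** 2)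
--
--     # consider the line from (0, 0) to (x, y)
--     # this line will have the slope of y / x
--     # let's now make a right angle from this line
--     # (there's actually two ways to make a right angle from this line)
--     # 1. going up and to the left and 2. going down and to the right
--     # To see how many point these lines intersect, we can use the slope to
--     # travel in integer jumps. Because there may be many points along the way,
--     # we should reduce the fraction of the slope to the smallest form.
--     # E.g., if the slope was 4 / 8, we can reduce this to 1 / 2 and move to other points
--     # by going 1 up and 2 left or 1 down and 2 right.
--
--     points = (
--         # Don't need to consider the points along the axes because we already counted those.
--         (x, y) for x in range(1, n + 1) for y in range(1, n + 1)
--     )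
--
--     for (x, y) in points:
--         # simplify slope fraction. integer division ensures integer steps.
--         d = gcd(y, x)
--         x_step = x // d
--         y_step = y // d
--         # Since we have one point at (0, 0), one point at (x, y) and a third point along the perpendicular, each one
--         # of these points makes a right-angled triangle.
--         # use min because both coordinates need to stay within the grid.
--         # count how many points there are on the perpendicular line going up and to the left.
--         num_triangles += min((n - x) // y_step, y // x_step)
--         # count how many points there are on the perpendicular line going down and to the right.
--         num_triangles += min((n - y) // x_step, x // y_step)
--
--     return num_triangles
-- ===== SOURCE B (Python) =====
-- from math import gcd
--
--
-- def _ray(n, px, py, sx, sy):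
--     """Count lattice points on the ray starting at (px, py), stepping by
--     (sx, sy), while they stay inside the grid [0, n] x [0, n]."""
--     count = 0
--     while 0 <= px <= n and 0 <= py <= n:
--         count += 1
--         px += sx
--         py += sy
--     return count
--
--
-- def get_num_right_angle_triangles(n):
--     if n <= 0:
--         return 0
--     # Triangles with the right angle at the origin or on an axis/edge line.
--     total = 3 * n * n
--     # For each interior-candidate point P=(x, y), walk along the line through P
--     # perpendicular to OP in both directions, counting every grid point met.
--     for x in range(1, n + 1):
--         for y in range(1, n + 1):
--             d = gcd(x, y)
--             dx = x // d
--             dy = y // d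
--             total += _ray(n, x - dy, y + dx, -dy, dx)
--             total += _ray(n, x + dy, y - dx, dy, -dx)
--     return total
-- ===== Notes on version B (the rewrite author's own statement) =====
-- stated objective: alternative
-- what changed: B replaces A's closed-form min-of-floor-divisions count of points on each perpendicular with an explicit walk along the perpendicular ray in primitive steps, counting the lattice points it actually visits.
import Mathlib
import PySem

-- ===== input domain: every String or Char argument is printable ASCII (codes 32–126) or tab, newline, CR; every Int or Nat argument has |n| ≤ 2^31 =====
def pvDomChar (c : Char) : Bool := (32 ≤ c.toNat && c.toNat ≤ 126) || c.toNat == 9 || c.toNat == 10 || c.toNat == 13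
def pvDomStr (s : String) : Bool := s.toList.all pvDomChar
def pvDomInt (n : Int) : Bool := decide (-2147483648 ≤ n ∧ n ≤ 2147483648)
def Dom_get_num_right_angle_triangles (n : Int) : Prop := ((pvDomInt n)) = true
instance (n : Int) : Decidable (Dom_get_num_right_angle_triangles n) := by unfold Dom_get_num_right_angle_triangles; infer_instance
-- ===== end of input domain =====

-- B counts the lattice points on each perpendicular by explicitly walking the ray in primitive
-- steps instead of A's closed-form min of floor divisions (objective: alternative).

-- ===== PORT A =====
def get_num_right_angle_triangles (n : Int) : Int :=
  if n ≤ 0 then 0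
  else
    (PySem.List.pyRange 1 (n + 1) 1).foldl (fun acc x =>
      (PySem.List.pyRange 1 (n + 1) 1).foldl (fun acc y =>
        let d : Int := Int.gcd y x
        let x_step := PySem.Int.floordiv x d
        let y_step := PySem.Int.floordiv y d
        acc + min (PySem.Int.floordiv (n - x) y_step) (PySem.Int.floordiv y x_step)
            + min (PySem.Int.floordiv (n - y) x_step) (PySem.Int.floordiv x y_step)) acc)
      (0 + 3 * n ^ 2)

-- ===== PORT B =====
-- _ray of Source B: the `if sy = 0 then 1` branch is a totality guard only (a while loop with
-- sy = 0 could never leave the vertical bounds); every call below passes sy = ±dx ≠ 0.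
def pvRay (n px py sx sy : Int) : Int :=
  if 0 ≤ px ∧ px ≤ n ∧ 0 ≤ py ∧ py ≤ n then
    if sy = 0 then 1
    else 1 + pvRay n (px + sx) (py + sy) sx sy
  else 0
termination_by (if 0 < sy then n + 1 - py else py + 1).toNat
decreasing_by
  rename_i h hsy
  split <;> omega

def get_num_right_angle_triangles_alt (n : Int) : Int :=
  if n ≤ 0 then 0
  else
    (PySem.List.pyRange 1 (n + 1) 1).foldl (fun acc x =>
      (PySem.List.pyRange 1 (n + 1) 1).foldl (fun acc y =>
        let d : Int := Int.gcd x y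
        let dx := PySem.Int.floordiv x d
        let dy := PySem.Int.floordiv y d
        acc + pvRay n (x - dy) (y + dx) (-dy) dx
            + pvRay n (x + dy) (y - dx) dy (-dx)) acc)
      (3 * n * n)

-- ===== PRECONDITION & SPEC =====
def Spec_get_num_right_angle_triangles (n : Int) (out : Int) : Prop := out = get_num_right_angle_triangles_alt n
instance (n : Int) (out : Int) : Decidable (Spec_get_num_right_angle_triangles n out) := by unfold Spec_get_num_right_angle_triangles; infer_instance

-- ===== CLAIM (what is proved, stated in full; the proofs are below) =====
def Claim_equal_get_num_right_angle_triangles : Prop := ∀ (n : Int), Dom_get_num_right_angle_triangles n → Spec_get_num_right_angle_triangles n (get_num_right_angle_triangles n)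

-- ===== LEMMAS AND PROOFS =====

-- reflecting the grid through its centre maps a ray walk to a ray walk
theorem pvRay_reflect (n px py sx sy : Int) :
    pvRay n px py sx sy = pvRay n (n - px) (n - py) (-sx) (-sy) := by
  fun_induction pvRay n px py sx sy with
  | case1 px py h hsy =>
    have h1 : 0 ≤ n - px ∧ n - px ≤ n ∧ 0 ≤ n - py ∧ n - py ≤ n := by omega
    rw [pvRay, if_pos h1, if_pos (show -sy = 0 by omega)]
  | case2 px py h hsy ih =>
    rw [ih]
    conv_rhs => rw [pvRay]
    have h1 : 0 ≤ n - px ∧ n - px ≤ n ∧ 0 ≤ n - py ∧ n - py ≤ n := by omega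
    have h2 : ¬ (-sy = 0) := by omega
    rw [if_pos h1, if_neg h2,
        show n - (px + sx) = n - px + -sx by ring,
        show n - (py + sy) = n - py + -sy by ring]
  | case3 px py h =>
    have h1 : ¬ (0 ≤ n - px ∧ n - px ≤ n ∧ 0 ≤ n - py ∧ n - py ≤ n) := by omega
    rw [pvRay, if_neg h1]

-- closed form for the up-left walk (step (-dy, dx))
theorem pvRay_ul (n dx dy : Int) (hdx : 0 < dx) (hdy : 0 < dy) :
    ∀ (px py : Int), px ≤ n → 0 ≤ py →
    pvRay n px py (-dy) dx = max 0 (min (px / dy + 1) ((n - py) / dx + 1)) := by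
  intro px py
  fun_induction pvRay n px py (-dy) dx with
  | case1 px py h hsy => omega
  | case2 px py h hsy ih =>
    intro hpx hpy
    have ha : 0 ≤ px / dy := Int.ediv_nonneg h.1 (le_of_lt hdy)
    have hb : 0 ≤ (n - py) / dx := Int.ediv_nonneg (by omega) (le_of_lt hdx)
    have e1 : (px + -dy) / dy = px / dy - 1 := by
      have := Int.add_mul_ediv_right px (-1) (show dy ≠ 0 by omega)
      simpa using this
    have e2 : (n - (py + dx)) / dx = (n - py) / dx - 1 := by
      have := Int.add_mul_ediv_right (n - py) (-1) (show dx ≠ 0 by omega)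
      rw [show n - (py + dx) = n - py + (-1) * dx by ring]
      simpa using this
    rw [ih (by omega) (by omega), e1, e2]
    omega
  | case3 px py h =>
    intro hpx hpy
    have hor : px < 0 ∨ n < py := by omega
    rcases hor with hc | hc
    · have : px / dy < 0 := Int.ediv_neg_of_neg_of_pos hc hdy
      omega
    · have : (n - py) / dx < 0 := Int.ediv_neg_of_neg_of_pos (by omega) hdx
      omega

-- closed form for the down-right walk (step (dy, -dx)), by reflection
theorem pvRay_dr (n px py dx dy : Int) (hdx : 0 < dx) (hdy : 0 < dy)
    (hpx : 0 ≤ px) (hpy : py ≤ n) :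
    pvRay n px py dy (-dx) = max 0 (min ((n - px) / dy + 1) (py / dx + 1)) := by
  rw [pvRay_reflect n px py dy (-dx), neg_neg]
  rw [pvRay_ul n dx dy hdx hdy (n - px) (n - py) (by omega) (by omega),
      show n - (n - py) = py by ring]

-- per grid point, A's two closed-form counts equal B's two ray walks
theorem pvCell (n x y : Int) (hx1 : 1 ≤ x) (hxn : x ≤ n) (hy1 : 1 ≤ y) (hyn : y ≤ n) :
    min (PySem.Int.floordiv (n - x) (PySem.Int.floordiv y (Int.gcd y x)))
        (PySem.Int.floordiv y (PySem.Int.floordiv x (Int.gcd y x)))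
      + min (PySem.Int.floordiv (n - y) (PySem.Int.floordiv x (Int.gcd y x)))
        (PySem.Int.floordiv x (PySem.Int.floordiv y (Int.gcd y x)))
    = pvRay n (x - PySem.Int.floordiv y (Int.gcd x y)) (y + PySem.Int.floordiv x (Int.gcd x y))
        (-(PySem.Int.floordiv y (Int.gcd x y))) (PySem.Int.floordiv x (Int.gcd x y))
      + pvRay n (x + PySem.Int.floordiv y (Int.gcd x y)) (y - PySem.Int.floordiv x (Int.gcd x y))
        (PySem.Int.floordiv y (Int.gcd x y)) (-(PySem.Int.floordiv x (Int.gcd x y))) := by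
  have hgc : Int.gcd y x = Int.gcd x y := Int.gcd_comm y x
  set dn : Nat := Int.gcd x y with hdn
  have hdnz : dn ≠ 0 := by
    simp only [hdn, Ne, Int.gcd_eq_zero_iff]
    omega
  have hd : (0 : Int) < (dn : Int) := by exact_mod_cast Nat.pos_of_ne_zero hdnz
  have hdvdx : (dn : Int) ∣ x := Int.gcd_dvd_left x y
  have hdvdy : (dn : Int) ∣ y := Int.gcd_dvd_right x y
  rw [hgc]
  rw [PySem.Int.floordiv_eq_ediv_of_pos (a := x) hd, PySem.Int.floordiv_eq_ediv_of_pos (a := y) hd]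
  set xs : Int := x / (dn : Int) with hxs
  set ys : Int := y / (dn : Int) with hys
  have hxeq : xs * (dn : Int) = x := Int.ediv_mul_cancel hdvdx
  have hyeq : ys * (dn : Int) = y := Int.ediv_mul_cancel hdvdy
  have hxsp : 0 < xs := by nlinarith
  have hysp : 0 < ys := by nlinarith
  rw [PySem.Int.floordiv_eq_ediv_of_pos (a := n - x) hysp, PySem.Int.floordiv_eq_ediv_of_pos (a := y) hxsp,
      PySem.Int.floordiv_eq_ediv_of_pos (a := n - y) hxsp, PySem.Int.floordiv_eq_ediv_of_pos (a := x) hysp]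
  have hray1 := pvRay_ul n xs ys hxsp hysp (x - ys) (y + xs) (by omega) (by omega)
  have hray2 := pvRay_dr n (x + ys) (y - xs) xs ys hxsp hysp (by omega) (by omega)
  have e1 : (x - ys) / ys = x / ys - 1 := by
    have := Int.add_mul_ediv_right x (-1) (show ys ≠ 0 by omega)
    rw [show x - ys = x + (-1) * ys by ring]; simpa using this
  have e2 : (n - (y + xs)) / xs = (n - y) / xs - 1 := by
    have := Int.add_mul_ediv_right (n - y) (-1) (show xs ≠ 0 by omega)
    rw [show n - (y + xs) = n - y + (-1) * xs by ring]; simpa using this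
  have e3 : (n - (x + ys)) / ys = (n - x) / ys - 1 := by
    have := Int.add_mul_ediv_right (n - x) (-1) (show ys ≠ 0 by omega)
    rw [show n - (x + ys) = n - x + (-1) * ys by ring]; simpa using this
  have e4 : (y - xs) / xs = y / xs - 1 := by
    have := Int.add_mul_ediv_right y (-1) (show xs ≠ 0 by omega)
    rw [show y - xs = y + (-1) * xs by ring]; simpa using this
  rw [e1, e2] at hray1
  rw [e3, e4] at hray2
  have n1 : 0 ≤ x / ys := Int.ediv_nonneg (by omega) (by omega)
  have n2 : 0 ≤ (n - y) / xs := Int.ediv_nonneg (by omega) (by omega)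
  have n3 : 0 ≤ (n - x) / ys := Int.ediv_nonneg (by omega) (by omega)
  have n4 : 0 ≤ y / xs := Int.ediv_nonneg (by omega) (by omega)
  omega

-- ===== VERDICT (by name: the statement is the Claim_ definition above) =====
theorem get_num_right_angle_triangles_spec : Claim_equal_get_num_right_angle_triangles := by
  intro n _
  unfold Spec_get_num_right_angle_triangles get_num_right_angle_triangles get_num_right_angle_triangles_alt
  by_cases hn : n ≤ 0
  · rw [if_pos hn, if_pos hn]
  · rw [if_neg hn, if_neg hn, show (0 : Int) + 3 * n ^ 2 = 3 * n * n by ring]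
    refine PySem.List.foldl_congr_mem' _ _ _ _ ?_
    intro x hx acc
    refine PySem.List.foldl_congr_mem' _ _ _ _ ?_
    intro y hy acc2
    have hx' := (PySem.List.mem_pyRange_one).mp hx
    have hy' := (PySem.List.mem_pyRange_one).mp hy
    have hc := pvCell n x y hx'.1 (by omega) hy'.1 (by omega)
    dsimp only
    omega
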